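-- pv_equiv track=rewrite | github.com/dimajeee/misis | third_course/sixth_semestr/network_applications_python/lab2/level3.py | sort_negatives_descending
-- ===== SOURCE A (Python) =====
-- def sort_negatives_descending(arr):
--     negatives = sorted([x for x in arr if x < 0], reverse=True)
--     neg_idx = 0
--
--     for i in range(len(arr)):
--         if arr[i] < 0:
--             arr[i] = negatives[neg_idx]
--             neg_idx += 1
--
--     return arr
-- ===== SOURCE B (Python) =====
-- def sort_negatives_descending(arr):
--     # Iterative selection: repeatedly copy the nonnegative run, then swap the largest
--     # remaining negative into the first negative slot; no library sort, no filter pass.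
--     out = []
--     rest = arr
--     while True:
--         k = 0
--         n = len(rest)
--         while k < n and rest[k] >= 0:
--             out.append(rest[k])
--             k += 1
--         if k == n:
--             break
--         v = rest[k]
--         m = v
--         for x in rest[k + 1:]:
--             if x < 0 and x > m:
--                 m = x
--         tail = rest[k + 1:]
--         if m != v:
--             tail[tail.index(m)] = v
--         out.append(m)
--         rest = tail
--     arr[:] = out
--     return arr
-- ===== Notes on version B (the rewrite author's own statement) =====
-- stated objective: alternative
-- what changed: B replaces A's filter-sort-scatter (library sort of the negatives, then a counter-driven refill pass) with an iterative in-place selection: copy each nonnegative run, scan the remainder for the largest remaining negative, swap it into the first negative slot, and continue on the tail - no library sort and no precomputed filter list.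
import Mathlib
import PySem

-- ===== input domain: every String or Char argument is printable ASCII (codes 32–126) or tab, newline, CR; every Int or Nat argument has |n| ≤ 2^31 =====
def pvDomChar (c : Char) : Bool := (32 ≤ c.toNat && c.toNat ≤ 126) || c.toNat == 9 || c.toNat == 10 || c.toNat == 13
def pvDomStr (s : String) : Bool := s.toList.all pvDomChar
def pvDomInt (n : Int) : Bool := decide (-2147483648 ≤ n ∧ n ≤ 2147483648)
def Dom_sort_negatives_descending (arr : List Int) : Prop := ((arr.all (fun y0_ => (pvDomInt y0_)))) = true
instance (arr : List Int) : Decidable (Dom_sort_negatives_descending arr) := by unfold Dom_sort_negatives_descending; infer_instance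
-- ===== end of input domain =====

-- B replaces A's filter/library-sort/refill with a recursive selection: swap the largest
-- remaining negative into the first negative slot and recurse on the suffix.
-- Both Pythons mutate arr in place (the same final contents); the equivalence proved
-- here is about the returned value.

-- ===== PORT A =====
-- A's loop: walk arr left to right; each negative position takes the next element of
-- `negatives` (the neg_idx counter becomes consuming the head of the remaining list).
def pvReplA : List Int → List Int → List Int
  | [], _ => []
  | x :: xs, negs =>
    if x < 0 then
      match negs with
      | n :: rest => n :: pvReplA xs rest
      | [] => x :: pvReplA xs []   -- unreachable: negs holds exactly the negatives of arr
    else x :: pvReplA xs negs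

def sort_negatives_descending (arr : List Int) : List Int :=
  pvReplA arr (PySem.List.sorted (arr.filter (fun x => decide (x < 0))) (fun x => x) true)

-- ===== PORT B =====
-- the `while rest and rest[0] >= 0` prefix loop of go: split xs at its first negative
-- (returns (pre, none) when there is none, i.e. `if not rest: return pre`)
def pvSplitNeg : List Int → List Int × Option (Int × List Int)
  | [] => ([], none)
  | x :: t =>
    if x < 0 then ([], some (x, t))
    else
      let (p, r) := pvSplitNeg t
      (x :: p, r)

-- `for x in rest: if x < 0 and x > m: m = x` starting from m = v
def pvMaxNeg (v : Int) (rest : List Int) : Int :=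
  rest.foldl (fun m x => if x < 0 ∧ m < x then x else m) v

-- `rest[rest.index(m)] = v`: replace the first occurrence of m by v
def pvReplFirst (xs : List Int) (m v : Int) : List Int :=
  match xs with
  | [] => []
  | x :: t => if x = m then v :: t else x :: pvReplFirst t m v

theorem pvSplitNeg_len : ∀ (xs pre : List Int) (v : Int) (rest : List Int),
    pvSplitNeg xs = (pre, some (v, rest)) → pre.length + rest.length + 1 = xs.length := by
  intro xs
  induction xs with
  | nil => intro pre v rest h; simp [pvSplitNeg] at h
  | cons x t ih =>
    intro pre v rest h
    by_cases hx : x < 0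
    · simp [pvSplitNeg, hx] at h
      obtain ⟨h1, h2, h3⟩ := h
      simp [← h1, ← h3]
    · rcases hps : pvSplitNeg t with ⟨p, r⟩
      simp [pvSplitNeg, hx, hps] at h
      obtain ⟨h1, h2⟩ := h
      have := ih p v rest (by rw [hps, h2])
      simp [← h1]
      omega

theorem pvReplFirst_len (xs : List Int) (m v : Int) :
    (pvReplFirst xs m v).length = xs.length := by
  induction xs with
  | nil => rfl
  | cons x t ih => by_cases h : x = m <;> simp [pvReplFirst, h, ih]

-- the outer while loop, state (out, rest): copy the nonnegative run into out; if a
-- negative v heads the remainder, select the max negative m of v::rest, swap v into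
-- m's slot when m ≠ v, append m to out and continue on the tail.
def pvGoLoop (out xs : List Int) : List Int :=
  match hs : pvSplitNeg xs with
  | (pre, none) => out ++ pre
  | (pre, some (v, rest)) =>
    let m := pvMaxNeg v rest
    let rest' := if m ≠ v then pvReplFirst rest m v else rest
    pvGoLoop (out ++ pre ++ [m]) rest'
termination_by xs.length
decreasing_by
  have h := pvSplitNeg_len xs pre v rest hs
  split
  · simp only [pvReplFirst_len]; omega
  · omega

def sort_negatives_descending_alt (arr : List Int) : List Int := pvGoLoop [] arr

-- ===== PRECONDITION & SPEC =====
def Spec_sort_negatives_descending (arr : List Int) (out : List Int) : Prop := out = sort_negatives_descending_alt arr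
instance (arr : List Int) (out : List Int) : Decidable (Spec_sort_negatives_descending arr out) := by unfold Spec_sort_negatives_descending; infer_instance

-- ===== CLAIM (what is proved, stated in full; the proofs are below) =====
def Claim_equal_sort_negatives_descending : Prop := ∀ (arr : List Int), Dom_sort_negatives_descending arr → Spec_sort_negatives_descending arr (sort_negatives_descending arr)

-- ===== LEMMAS AND PROOFS =====

-- proof-side recursive form of the loop (the loop is pvGoLoop with an accumulator)
def pvGo (xs : List Int) : List Int :=
  match hs : pvSplitNeg xs with
  | (pre, none) => pre
  | (pre, some (v, rest)) =>
    let m := pvMaxNeg v rest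
    let rest' := if m ≠ v then pvReplFirst rest m v else rest
    pre ++ m :: pvGo rest'
termination_by xs.length
decreasing_by
  have h := pvSplitNeg_len xs pre v rest hs
  split
  · simp only [pvReplFirst_len]; omega
  · omega

-- unfolding equations for pvGoLoop and pvGo
theorem pvGoLoop_none (out xs pre : List Int) (h : pvSplitNeg xs = (pre, none)) :
    pvGoLoop out xs = out ++ pre := by
  rw [pvGoLoop.eq_def]
  split
  · next pre' heq => rw [h] at heq; injection heq with h1 _; rw [h1]
  · next pre' v' rest' heq => rw [h] at heq; simp at heq

theorem pvGoLoop_some (out xs pre : List Int) (v : Int) (rest : List Int)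
    (h : pvSplitNeg xs = (pre, some (v, rest))) :
    pvGoLoop out xs = pvGoLoop (out ++ pre ++ [pvMaxNeg v rest])
      (if pvMaxNeg v rest ≠ v then pvReplFirst rest (pvMaxNeg v rest) v else rest) := by
  rw [pvGoLoop.eq_def]
  split
  · next pre' heq => rw [h] at heq; simp at heq
  · next pre' v' rest' heq =>
    rw [h] at heq
    injection heq with h1 h2
    injection h2 with h2
    injection h2 with h2 h3
    subst h1; subst h2; subst h3
    rfl

theorem pvGo_none (xs pre : List Int) (h : pvSplitNeg xs = (pre, none)) : pvGo xs = pre := by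
  rw [pvGo.eq_def]
  split
  · next pre' heq => rw [h] at heq; injection heq with h1 _; rw [h1]
  · next pre' v' rest' heq => rw [h] at heq; simp at heq

theorem pvGo_some (xs pre : List Int) (v : Int) (rest : List Int)
    (h : pvSplitNeg xs = (pre, some (v, rest))) :
    pvGo xs = pre ++ pvMaxNeg v rest ::
      pvGo (if pvMaxNeg v rest ≠ v then pvReplFirst rest (pvMaxNeg v rest) v else rest) := by
  rw [pvGo.eq_def]
  split
  · next pre' heq => rw [h] at heq; simp at heq
  · next pre' v' rest' heq =>
    rw [h] at heq
    injection heq with h1 h2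
    injection h2 with h2
    injection h2 with h2 h3
    subst h1; subst h2; subst h3
    rfl

-- descending sort named by its result: any ≥-ordered rearrangement IS sorted(·, reverse=True)
theorem sortedRev_eq_of_perm_of_pairwise_ge (xs ys : List Int)
    (hp : ys.Perm xs) (h : ys.Pairwise (fun a b => b ≤ a)) :
    PySem.List.sorted xs (fun x => x) true = ys := by
  have h1 : (PySem.List.sorted xs (fun x => x) true).Perm ys :=
    (PySem.List.sorted_perm xs (fun x => x) true).trans hp.symm
  have h2 := PySem.List.sorted_pairwise_rev xs (fun x => x)
  exact h1.eq_of_pairwise (fun a b _ _ hab hba => le_antisymm hba hab) h2 h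

theorem pvReplA_nil (arr : List Int) : pvReplA arr [] = arr := by
  induction arr with
  | nil => rfl
  | cons x xs ih => by_cases h : x < 0 <;> simp [pvReplA, h, ih]

theorem pvSplitNeg_none (xs : List Int) (pre : List Int)
    (h : pvSplitNeg xs = (pre, none)) : pre = xs ∧ ∀ x ∈ xs, ¬ x < 0 := by
  induction xs generalizing pre with
  | nil => simp [pvSplitNeg] at h; simp [h]
  | cons x t ih =>
    by_cases hx : x < 0
    · simp [pvSplitNeg, hx] at h
    · rcases hps : pvSplitNeg t with ⟨p, r⟩
      simp [pvSplitNeg, hx, hps] at h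
      obtain ⟨h1, h2⟩ := h
      obtain ⟨hp, hall⟩ := ih p (by rw [hps, h2])
      constructor
      · rw [← h1, hp]
      · intro y hy
        rcases List.mem_cons.mp hy with hy' | hy'
        · subst hy'; exact hx
        · exact hall y hy'

theorem pvSplitNeg_some (xs pre : List Int) (v : Int) (rest : List Int)
    (h : pvSplitNeg xs = (pre, some (v, rest))) :
    xs = pre ++ v :: rest ∧ (∀ x ∈ pre, ¬ x < 0) ∧ v < 0 := by
  induction xs generalizing pre with
  | nil => simp [pvSplitNeg] at h
  | cons x t ih =>
    by_cases hx : x < 0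
    · simp [pvSplitNeg, hx] at h
      obtain ⟨h1, h2, h3⟩ := h
      subst h1; subst h2; subst h3
      exact ⟨rfl, by simp, hx⟩
    · rcases hps : pvSplitNeg t with ⟨p, r⟩
      simp [pvSplitNeg, hx, hps] at h
      obtain ⟨h1, h2⟩ := h
      obtain ⟨ht, hall, hv⟩ := ih p (by rw [hps, h2])
      refine ⟨?_, ?_, hv⟩
      · rw [← h1, ht]; simp
      · intro y hy
        rw [← h1] at hy
        rcases List.mem_cons.mp hy with hy' | hy'
        · subst hy'; exact hx
        · exact hall y hy'

theorem pvMaxNeg_cons (v x : Int) (t : List Int) :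
    pvMaxNeg v (x :: t) = if x < 0 ∧ v < x then pvMaxNeg x t else pvMaxNeg v t := by
  by_cases h : x < 0 ∧ v < x <;> simp [pvMaxNeg, h]

-- properties of the max scan, all at once
theorem pvMaxNeg_props (rest : List Int) (v : Int) (hv : v < 0) :
    pvMaxNeg v rest < 0 ∧ v ≤ pvMaxNeg v rest ∧
    (pvMaxNeg v rest = v ∨ pvMaxNeg v rest ∈ rest) ∧
    (∀ x ∈ rest, x < 0 → x ≤ pvMaxNeg v rest) := by
  induction rest generalizing v with
  | nil => exact ⟨hv, le_refl v, Or.inl rfl, by simp⟩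
  | cons x t ih =>
    rw [pvMaxNeg_cons]
    by_cases hx : x < 0 ∧ v < x
    · rw [if_pos hx]
      obtain ⟨h0, hle, hmem, hmax⟩ := ih x hx.1
      refine ⟨h0, le_of_lt (lt_of_lt_of_le hx.2 hle), ?_, ?_⟩
      · rcases hmem with h' | h'
        · exact Or.inr (by rw [h']; exact List.mem_cons_self ..)
        · exact Or.inr (List.mem_cons_of_mem x h')
      · intro y hy hyneg
        rcases List.mem_cons.mp hy with hy' | hy'
        · subst hy'; exact hle
        · exact hmax y hy' hyneg
    · rw [if_neg hx]
      obtain ⟨h0, hle, hmem, hmax⟩ := ih v hv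
      refine ⟨h0, hle, ?_, ?_⟩
      · rcases hmem with h' | h'
        · exact Or.inl h'
        · exact Or.inr (List.mem_cons_of_mem x h')
      · intro y hy hyneg
        rcases List.mem_cons.mp hy with hy' | hy'
        · subst hy'
          rcases not_and_or.mp hx with h' | h'
          · exact absurd hyneg h'
          · exact le_trans (not_lt.mp h') hle
        · exact hmax y hy' hyneg

theorem pvReplA_append (pre ys l : List Int) (hpre : ∀ x ∈ pre, ¬ x < 0) :
    pvReplA (pre ++ ys) l = pre ++ pvReplA ys l := by
  induction pre with
  | nil => rfl
  | cons p ps ih =>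
    have hp : ¬ p < 0 := hpre p (by simp)
    simp only [List.cons_append, pvReplA, if_neg hp]
    rw [ih (fun x hx => hpre x (by simp [hx]))]

-- replacing one negative by another commutes with the negatives filter
theorem filter_pvReplFirst (xs : List Int) (m v : Int) (hm : m < 0) (hv : v < 0) :
    (pvReplFirst xs m v).filter (fun x => decide (x < 0)) =
      pvReplFirst (xs.filter (fun x => decide (x < 0))) m v := by
  induction xs with
  | nil => rfl
  | cons x t ih =>
    by_cases hxm : x = m
    · subst hxm
      simp [pvReplFirst, hm, hv]
    · by_cases hx : x < 0
      · simp [pvReplFirst, hx, hxm, ih]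
      · simp [pvReplFirst, hx, hxm, ih]

theorem pvReplFirst_perm (l : List Int) (m v : Int) (hm : m ∈ l) :
    (m :: pvReplFirst l m v).Perm (v :: l) := by
  induction l with
  | nil => simp at hm
  | cons x t ih =>
    by_cases hxm : x = m
    · subst hxm
      simp only [pvReplFirst, if_pos]
      exact List.Perm.swap v x t
    · have hmt : m ∈ t := by
        rcases List.mem_cons.mp hm with h' | h'
        · exact absurd h'.symm hxm
        · exact h'
      simp only [pvReplFirst, if_neg hxm]
      exact ((List.Perm.swap x m _).trans ((ih hmt).cons x)).trans (List.Perm.swap v x t)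

-- A's refill only looks at the sign pattern: replacing one negative value by another
-- (with enough fill values) does not change the result
theorem pvReplA_replFirst (xs : List Int) (m v : Int) (l : List Int)
    (hm : m < 0) (hv : v < 0)
    (hlen : (xs.filter (fun x => decide (x < 0))).length ≤ l.length) :
    pvReplA (pvReplFirst xs m v) l = pvReplA xs l := by
  induction xs generalizing l with
  | nil => rfl
  | cons x t ih =>
    by_cases hxm : x = m
    · subst hxm
      simp only [List.filter_cons, hm, decide_true, List.length_cons, if_pos] at hlen
      obtain ⟨n, l', rfl⟩ : ∃ n l', l = n :: l' := by
        cases l with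
        | nil => simp at hlen
        | cons n l' => exact ⟨n, l', rfl⟩
      simp [pvReplFirst, pvReplA, hm, hv]
    · by_cases hx : x < 0
      · simp only [List.filter_cons, hx, decide_true, List.length_cons, if_pos] at hlen
        obtain ⟨n, l', rfl⟩ : ∃ n l', l = n :: l' := by
          cases l with
          | nil => simp at hlen
          | cons n l' => exact ⟨n, l', rfl⟩
        simp only [pvReplFirst, if_neg hxm, pvReplA, if_pos hx]
        rw [ih l' (by simpa using hlen)]
      · simp only [List.filter_cons, hx] at hlen
        simp only [pvReplFirst, if_neg hxm, pvReplA, if_neg hx]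
        rw [ih l (by simpa using hlen)]

-- the accumulator loop is the recursive form
theorem pvGoLoop_eq_pvGo (n : Nat) : ∀ (xs out : List Int), xs.length ≤ n →
    pvGoLoop out xs = out ++ pvGo xs := by
  induction n with
  | zero =>
    intro xs out h
    have hnil : xs = [] := List.eq_nil_of_length_eq_zero (Nat.le_zero.mp h)
    subst hnil
    rw [pvGoLoop_none out [] [] rfl, pvGo_none [] [] rfl]
  | succ n ih =>
    intro xs out hlen
    rcases hs : pvSplitNeg xs with ⟨pre, o⟩
    cases o with
    | none => rw [pvGoLoop_none out xs pre hs, pvGo_none xs pre hs]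
    | some p =>
      obtain ⟨v, rest⟩ := p
      have hlens := pvSplitNeg_len xs pre v rest hs
      have hrlen : (if pvMaxNeg v rest ≠ v then pvReplFirst rest (pvMaxNeg v rest) v else rest).length
          = rest.length := by
        split <;> simp [pvReplFirst_len]
      rw [pvGoLoop_some out xs pre v rest hs, pvGo_some xs pre v rest hs,
        ih _ _ (by omega)]
      simp

-- main invariant: B's recursive selection computes A's sort-then-refill
theorem pvGo_eq (n : Nat) : ∀ (xs : List Int), xs.length ≤ n →
    pvGo xs = pvReplA xs (PySem.List.sorted (xs.filter (fun x => decide (x < 0))) (fun x => x) true) := by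
  induction n with
  | zero =>
    intro xs h
    have hnil : xs = [] := List.eq_nil_of_length_eq_zero (Nat.le_zero.mp h)
    subst hnil
    rw [pvGo_none [] [] rfl]
    rfl
  | succ n ih =>
    intro xs hlen
    rcases hs : pvSplitNeg xs with ⟨pre, o⟩
    cases o with
    | none =>
      obtain ⟨hp, hall⟩ := pvSplitNeg_none xs pre hs
      have hfil : xs.filter (fun x => decide (x < 0)) = [] := by
        rw [List.filter_eq_nil_iff]; intro x hx; simpa using hall x hx
      rw [pvGo_none xs pre hs, hfil]
      have hse : PySem.List.sorted ([] : List Int) (fun x => x) true = [] := rfl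
      rw [hse, pvReplA_nil, hp]
    | some p =>
      obtain ⟨v, rest⟩ := p
      obtain ⟨hxs, hpre, hv⟩ := pvSplitNeg_some xs pre v rest hs
      have hlens := pvSplitNeg_len xs pre v rest hs
      obtain ⟨hm0, hvm, hmem, hmax⟩ := pvMaxNeg_props rest v hv
      set m := pvMaxNeg v rest with hmdef
      set rest' := (if m ≠ v then pvReplFirst rest m v else rest) with hrdef
      have hrlen : rest'.length = rest.length := by
        rw [hrdef]; split <;> simp [pvReplFirst_len]
      have hrn : rest'.length ≤ n := by omega
      have hnegxs : xs.filter (fun x => decide (x < 0)) = v :: rest.filter (fun x => decide (x < 0)) := by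
        rw [hxs, List.filter_append]
        have hprefil : pre.filter (fun x => decide (x < 0)) = [] := by
          rw [List.filter_eq_nil_iff]; intro x hx; simpa using hpre x hx
        simp [hprefil, hv]
      have hperm : (m :: rest'.filter (fun x => decide (x < 0))).Perm
          (xs.filter (fun x => decide (x < 0))) := by
        rw [hnegxs]
        by_cases h : m ≠ v
        · have hmrest : m ∈ rest := by
            rcases hmem with h' | h'
            · exact absurd h' h
            · exact h'
          have hmf : m ∈ rest.filter (fun x => decide (x < 0)) := by
            simp [List.mem_filter, hmrest, hm0]
          rw [hrdef, if_pos h, filter_pvReplFirst rest m v hm0 hv]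
          exact pvReplFirst_perm _ m v hmf
        · have h' := not_not.mp h
          rw [hrdef, if_neg (by simp [h']), h']
      have hbound : ∀ y ∈ rest'.filter (fun x => decide (x < 0)), y ≤ m := by
        intro y hy
        have hyx : y ∈ xs.filter (fun x => decide (x < 0)) :=
          hperm.subset (List.mem_cons_of_mem m hy)
        rw [hnegxs] at hyx
        rcases List.mem_cons.mp hyx with h' | h'
        · exact le_trans (le_of_eq h') hvm
        · exact hmax y (List.mem_filter.mp h').1 (by simpa using (List.mem_filter.mp h').2)
      have hsorted : PySem.List.sorted (xs.filter (fun x => decide (x < 0))) (fun x => x) true =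
          m :: PySem.List.sorted (rest'.filter (fun x => decide (x < 0))) (fun x => x) true := by
        apply sortedRev_eq_of_perm_of_pairwise_ge
        · exact (List.Perm.cons m (PySem.List.sorted_perm _ _ _)).trans hperm
        · rw [List.pairwise_cons]
          refine ⟨?_, PySem.List.sorted_pairwise_rev _ _⟩
          intro y hy
          exact hbound y ((PySem.List.mem_sorted _ _ _ _).mp hy)
      rw [pvGo_some xs pre v rest hs, ← hmdef, ← hrdef]
      rw [ih rest' hrn]
      rw [hsorted, hxs, pvReplA_append _ _ _ hpre]
      simp only [pvReplA, if_pos hv]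
      congr 2
      by_cases h : m ≠ v
      · rw [hrdef, if_pos h]
        apply pvReplA_replFirst rest m v _ hm0 hv
        rw [(PySem.List.sorted_perm _ _ _).length_eq,
          filter_pvReplFirst rest m v hm0 hv, pvReplFirst_len]
      · rw [hrdef, if_neg h]

-- ===== VERDICT (by name: the statement is the Claim_ definition above) =====
theorem sort_negatives_descending_spec : Claim_equal_sort_negatives_descending := by
  intro arr _
  show _ = _
  rw [sort_negatives_descending, sort_negatives_descending_alt,
    pvGoLoop_eq_pvGo arr.length arr [] (le_refl _), List.nil_append,
    pvGo_eq arr.length arr (le_refl _)]
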